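-- pv_equiv track=rewrite | github.com/jemtca/CodingBat | Python/List-2/is_everywhere.py | is_everywhere
-- ===== SOURCE A (Python) =====
-- def is_everywhere(nums, val):
--     b = True
--     found = False
--
--     x = 0
--     while x < len(nums) - 1 and not found:
--         if nums[x] != val and nums[x+1] != val:
--             b = False
--             found = True
--         x += 1
--
--     return b
-- ===== SOURCE B (Python) =====
-- def is_everywhere(nums, val):
--     positions = [i for i, x in enumerate(nums) if x != val]
--     return all(positions[j+1] - positions[j] > 1 for j in range(len(positions)-1))
-- ===== Notes on version B (the rewrite author's own statement) =====
-- stated objective: alternative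
-- what changed: B materializes the index table of elements not equal to val and checks that no two of these indices are consecutive, instead of A's while loop over adjacent element pairs with b/found flags.
import Mathlib
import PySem

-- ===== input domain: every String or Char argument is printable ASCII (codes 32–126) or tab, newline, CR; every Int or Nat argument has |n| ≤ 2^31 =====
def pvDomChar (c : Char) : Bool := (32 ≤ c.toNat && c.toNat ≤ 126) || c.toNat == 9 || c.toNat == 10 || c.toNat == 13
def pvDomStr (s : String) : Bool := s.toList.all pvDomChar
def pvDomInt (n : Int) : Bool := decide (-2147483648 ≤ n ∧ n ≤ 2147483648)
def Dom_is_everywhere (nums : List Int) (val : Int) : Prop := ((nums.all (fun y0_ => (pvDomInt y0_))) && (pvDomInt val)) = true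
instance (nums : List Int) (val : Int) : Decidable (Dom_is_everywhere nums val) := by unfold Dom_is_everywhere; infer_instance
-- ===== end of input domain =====

-- B rewrites A's while loop with b/found flags as: build the index list of elements ≠ val,
-- then check no two of those indices are consecutive (objective: alternative decomposition).

-- ===== PORT A =====
-- the while loop: state (b, found), counter x; indexing nums[x] is in range whenever the
-- loop guard holds, so pyGet? … .getD 0 is exact here
def isEverywhereLoop (nums : List Int) (val : Int) (b found : Bool) (x : Int) : Bool :=
  if h : x < (nums.length : Int) - 1 ∧ found = false then
    if (PySem.List.pyGet? nums x).getD 0 ≠ val ∧ (PySem.List.pyGet? nums (x + 1)).getD 0 ≠ val then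
      isEverywhereLoop nums val false true (x + 1)
    else
      isEverywhereLoop nums val b found (x + 1)
  else b
termination_by ((nums.length : Int) - 1 - x).toNat
decreasing_by all_goals omega

def is_everywhere (nums : List Int) (val : Int) : Bool :=
  isEverywhereLoop nums val true false 0

-- ===== PORT B =====
-- positions = [i for i, x in enumerate(nums) if x != val]
def isEverywherePositions (nums : List Int) (val : Int) : List Int :=
  ((PySem.List.enumerate nums).filter (fun p => p.2 ≠ val)).map (fun p => p.1)

-- all(positions[j+1] - positions[j] > 1 …): the scan over consecutive pairs of positions
def isEverywhereAdjOk : List Int → Bool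
  | a :: b :: t => (b - a > 1) && isEverywhereAdjOk (b :: t)
  | _ => true

def is_everywhere_alt (nums : List Int) (val : Int) : Bool :=
  isEverywhereAdjOk (isEverywherePositions nums val)

-- ===== PRECONDITION & SPEC =====
def Spec_is_everywhere (nums : List Int) (val : Int) (out : Bool) : Prop := out = is_everywhere_alt nums val
instance (nums : List Int) (val : Int) (out : Bool) : Decidable (Spec_is_everywhere nums val out) := by unfold Spec_is_everywhere; infer_instance

-- ===== CLAIM (what is proved, stated in full; the proofs are below) =====
def Claim_equal_is_everywhere : Prop := ∀ (nums : List Int) (val : Int), Dom_is_everywhere nums val → Spec_is_everywhere nums val (is_everywhere nums val)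

-- ===== LEMMAS AND PROOFS =====

-- common characterisation: adjacent-pair scan over the list itself
def isEverywhereChk : List Int → Int → Bool
  | a :: b :: t, v => ((a == v) || (b == v)) && isEverywhereChk (b :: t) v
  | _, _ => true

-- A-side: the loop from index x computes the adjacent-pair scan of the suffix
theorem loopA_eq_chk (nums : List Int) (val : Int) :
    ∀ (k : Nat) (x : Int), 0 ≤ x → k = ((nums.length : Int) - 1 - x).toNat →
      isEverywhereLoop nums val true false x = isEverywhereChk (nums.drop x.toNat) val := by
  intro k
  induction k using Nat.strong_induction_on with
  | _ k ih =>
    intro x hx hk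
    rw [isEverywhereLoop]
    by_cases hlt : x < (nums.length : Int) - 1
    · have hxn : x.toNat < nums.length := by omega
      have hxn1 : x.toNat + 1 < nums.length := by omega
      have hdrop : nums.drop x.toNat = nums[x.toNat] :: nums.drop (x.toNat + 1) :=
        List.drop_eq_getElem_cons hxn
      have hdrop1 : nums.drop (x.toNat + 1) = nums[x.toNat + 1] :: nums.drop (x.toNat + 2) :=
        List.drop_eq_getElem_cons hxn1
      have hg0 : (PySem.List.pyGet? nums x).getD 0 = nums[x.toNat] := by
        rw [PySem.List.pyGet?_eq_some_getElem nums hx (by omega)]; rfl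
      have hg1 : (PySem.List.pyGet? nums (x + 1)).getD 0 = nums[x.toNat + 1] := by
        have hxt : (x + 1).toNat = x.toNat + 1 := by omega
        rw [PySem.List.pyGet?_eq_some_getElem nums (by omega) (by omega)]
        simp [hxt]
      have hrec : isEverywhereLoop nums val true false (x + 1)
          = isEverywhereChk (nums.drop (x + 1).toNat) val := by
        exact ih ((nums.length : Int) - 1 - (x + 1)).toNat (by omega) (x + 1) (by omega) rfl
      have hx1 : (x + 1).toNat = x.toNat + 1 := by omega
      rw [dif_pos ⟨hlt, rfl⟩]
      by_cases hcond : nums[x.toNat] ≠ val ∧ nums[x.toNat + 1] ≠ val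
      · rw [if_pos (by rw [hg0, hg1]; exact hcond)]
        rw [isEverywhereLoop, dif_neg (by simp)]
        rw [hdrop, hdrop1, isEverywhereChk]
        have h0 : (nums[x.toNat] == val) = false := by simpa using hcond.1
        have h1 : (nums[x.toNat + 1] == val) = false := by simpa using hcond.2
        simp [h0, h1]
      · rw [if_neg (by rw [hg0, hg1]; exact hcond)]
        rw [hrec, hx1, hdrop, hdrop1, isEverywhereChk, ← hdrop1]
        rcases not_and_or.mp hcond with h | h
        · simp at h; simp [h]
        · simp at h; simp [h]
    · rw [dif_neg (by intro h; exact hlt h.1)]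
      have : nums.length ≤ x.toNat + 1 := by omega
      rcases hsuf : nums.drop x.toNat with _ | ⟨a, t⟩
      · rfl
      · have hlen := congrArg List.length hsuf
        simp [List.length_drop] at hlen
        have ht : t = [] := by
          have : t.length = 0 := by omega
          exact List.eq_nil_of_length_eq_zero this
        subst ht; rfl

-- B-side: positions of a cons
theorem positions_cons (a : Int) (t : List Int) (val : Int) :
    ∀ s : Int, ((PySem.List.enumerate (a :: t) s).filter (fun p => p.2 ≠ val)).map (fun p => p.1)
      = (if a ≠ val then [s] else []) ++
        ((PySem.List.enumerate t (s + 1)).filter (fun p => p.2 ≠ val)).map (fun p => p.1) := by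
  intro s
  rw [PySem.List.enumerate_cons]
  by_cases h : a = val
  · simp [h]
  · simp [h]

theorem enumerate_shift (t : List Int) (val : Int) :
    ∀ s : Int, ((PySem.List.enumerate t (s + 1)).filter (fun p => p.2 ≠ val)).map (fun p => p.1)
      = (((PySem.List.enumerate t s).filter (fun p => p.2 ≠ val)).map (fun p => p.1)).map (· + 1) := by
  induction t with
  | nil => intro s; simp [PySem.List.enumerate_nil]
  | cons a t ih =>
    intro s
    rw [PySem.List.enumerate_cons, PySem.List.enumerate_cons]
    by_cases h : a = val
    · have := ih (s + 1)
      simp only [h]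
      simpa using this
    · have := ih (s + 1)
      simp only [List.filter_cons]
      simpa [h] using this

theorem adjOk_shift (l : List Int) : isEverywhereAdjOk (l.map (· + 1)) = isEverywhereAdjOk l := by
  induction l with
  | nil => rfl
  | cons a t ih =>
    cases t with
    | nil => rfl
    | cons b t' =>
      simp only [List.map_cons] at ih ⊢
      rw [isEverywhereAdjOk, isEverywhereAdjOk, ih]
      congr 1
      simp only [decide_eq_decide]
      omega

theorem positions_nonneg (t : List Int) (val : Int) (s : Int) (hs : 0 ≤ s) :
    ∀ p ∈ ((PySem.List.enumerate t s).filter (fun p => p.2 ≠ val)).map (fun p => p.1), 0 ≤ p := by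
  intro p hp
  simp only [List.mem_map, List.mem_filter] at hp
  obtain ⟨q, ⟨hq, _⟩, rfl⟩ := hp
  rw [PySem.List.mem_enumerate_iff] at hq
  obtain ⟨k, hk, rfl⟩ := hq
  simp; omega

theorem adjOk_zero_cons_double_shift (ys : List Int) (hnn : ∀ p ∈ ys, 0 ≤ p) :
    isEverywhereAdjOk (0 :: (ys.map (· + 1)).map (· + 1)) = isEverywhereAdjOk ys := by
  cases ys with
  | nil => rfl
  | cons y ys' =>
    simp only [List.map_cons]
    rw [isEverywhereAdjOk]
    have hy : 0 ≤ y := hnn y (by simp)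
    have h1 : ((y + 1 + 1 : Int) - 0 > 1) := by omega
    simp only [h1, decide_true, Bool.true_and]
    have h2 := adjOk_shift ((y :: ys').map (· + 1))
    simp only [List.map_cons] at h2
    rw [h2]
    exact adjOk_shift (y :: ys')

-- B-side main lemma: the positions scan equals the adjacent-pair scan
theorem alt_eq_chk (nums : List Int) (val : Int) :
    is_everywhere_alt nums val = isEverywhereChk nums val := by
  unfold is_everywhere_alt isEverywherePositions
  induction nums with
  | nil => rfl
  | cons a t ih =>
    cases t with
    | nil =>
      by_cases h : a = val <;> simp [PySem.List.enumerate_cons, PySem.List.enumerate_nil,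
        isEverywhereAdjOk, isEverywhereChk, h]
    | cons b t' =>
      rw [positions_cons a (b :: t') val 0, isEverywhereChk]
      by_cases ha : a = val
      · rw [if_neg (by simp [ha]), List.nil_append, enumerate_shift (b :: t') val 0,
          adjOk_shift, ih]
        simp [ha]
      · rw [if_pos ha, List.singleton_append, positions_cons b t' val (0 + 1)]
        by_cases hb : b = val
        · rw [if_neg (by simp [hb]), List.nil_append,
            enumerate_shift t' val (0 + 1), enumerate_shift t' val 0]
          rw [adjOk_zero_cons_double_shift _ (positions_nonneg t' val 0 le_rfl)]
          rw [positions_cons b t' val 0, if_neg (by simp [hb]), List.nil_append,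
            enumerate_shift t' val 0, adjOk_shift] at ih
          rw [ih]
          simp [hb]
        · rw [if_pos hb, List.singleton_append]
          rw [isEverywhereAdjOk]
          simp [ha, hb]

-- ===== VERDICT (by name: the statement is the Claim_ definition above) =====
theorem is_everywhere_spec : Claim_equal_is_everywhere := by
  intro nums val _
  unfold Spec_is_everywhere is_everywhere
  rw [loopA_eq_chk nums val ((nums.length : Int) - 1 - 0).toNat 0 le_rfl rfl, alt_eq_chk]
  rfl
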